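-- pv_equiv track=rewrite | github.com/pigorz/wenet | tools/eng_merge_v2.py | split_eng_chi
-- ===== SOURCE A (Python) =====
-- def split_eng_chi(s):
--     ss = ''
--     pre_i = ''
--     for i in s:
--         if i.encode('utf-8').isalpha() or i == '\'':
--             if pre_i in ['','\''] or pre_i.encode('utf-8').isalpha():
--                 ss = ss + i
--             else:
--                 ss = ss + '\t' + i
--         else:
--             if pre_i.encode('utf-8').isalpha() or pre_i == '\'':
--                 ss = ss + '\t' + i
--             else:
--                 ss += i
--         pre_i = i
--     return ss
-- ===== SOURCE B (Python) =====
-- from itertools import groupby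
--
--
-- def split_eng_chi(s):
--     key = lambda c: c.encode('utf-8').isalpha() or c == '\''
--     return '\t'.join(''.join(g) for _, g in groupby(s, key=key))
-- ===== Notes on version B (the rewrite author's own statement) =====
-- stated objective: idiomatic
-- what changed: Replaces the char-by-char loop that tracks the previous character's class and concatenates onto an accumulator string with itertools.groupby: split the string into maximal runs of one class and glue the runs with a tab separator via join.
import Mathlib
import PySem

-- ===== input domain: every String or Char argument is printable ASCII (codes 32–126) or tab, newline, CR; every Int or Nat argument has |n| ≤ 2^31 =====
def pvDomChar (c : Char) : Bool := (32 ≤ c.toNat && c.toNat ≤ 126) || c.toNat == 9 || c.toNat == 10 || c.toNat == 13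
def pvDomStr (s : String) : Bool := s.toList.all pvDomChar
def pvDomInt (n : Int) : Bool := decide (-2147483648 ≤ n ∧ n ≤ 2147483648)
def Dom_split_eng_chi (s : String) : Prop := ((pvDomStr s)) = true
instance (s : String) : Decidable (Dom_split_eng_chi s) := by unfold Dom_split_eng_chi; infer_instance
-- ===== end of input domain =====

-- B replaces A's previous-character-tracking loop by grouping the string into maximal
-- runs of one character class and joining the runs with '\t' (idiomatic, groupby style).

-- ===== PORT A =====
-- i.encode('utf-8').isalpha(): on the ASCII domain this is exactly the ASCII-letter test
def pvIsAl (c : Char) : Bool := PySem.Chars.isalpha c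

-- one step of A's loop; pre = none models pre_i = ''
def pvStepA (st : List Char × Option Char) (i : Char) : List Char × Option Char :=
  let ss := st.1
  let pre := st.2
  if pvIsAl i || i == '\'' then
    if (match pre with | none => true | some p => p == '\'') ||
       (match pre with | none => false | some p => pvIsAl p) then
      (ss ++ [i], some i)
    else
      (ss ++ ['\t', i], some i)
  else
    if (match pre with | none => false | some p => pvIsAl p) ||
       (match pre with | none => false | some p => p == '\'') then
      (ss ++ ['\t', i], some i)
    else
      (ss ++ [i], some i)

def split_eng_chi (s : String) : String :=
  String.ofList (s.toList.foldl pvStepA ([], none)).1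

-- ===== PORT B =====
-- the class key of Source B: c.encode('utf-8').isalpha() or c == "'"
def pvKey (c : Char) : Bool := PySem.Chars.isalpha c || c == '\''

-- groupby: the maximal run starting at c, and the remaining runs
def pvRunGo (c : Char) : List Char → List Char × List (List Char)
  | [] => ([c], [])
  | d :: ds =>
    let (r, rs) := pvRunGo d ds
    if pvKey c == pvKey d then (c :: r, rs) else ([c], r :: rs)

def pvRuns : List Char → List (List Char)
  | [] => []
  | c :: cs => let (r, rs) := pvRunGo c cs; r :: rs

def split_eng_chi_alt (s : String) : String :=
  String.ofList ((List.intersperse ['\t'] (pvRuns s.toList)).flatten)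

-- ===== PRECONDITION & SPEC =====
def Spec_split_eng_chi (s : String) (out : String) : Prop := out = split_eng_chi_alt s
instance (s : String) (out : String) : Decidable (Spec_split_eng_chi s out) := by unfold Spec_split_eng_chi; infer_instance

-- ===== CLAIM (what is proved, stated in full; the proofs are below) =====
def Claim_equal_split_eng_chi : Prop := ∀ (s : String), Dom_split_eng_chi s → Spec_split_eng_chi s (split_eng_chi s)

-- ===== LEMMAS AND PROOFS =====

-- canonical emission: characters of l, a '\t' before each class change relative to b
def pvEmit (b : Bool) : List Char → List Char
  | [] => []
  | c :: cs => (if pvKey c == b then [c] else ['\t', c]) ++ pvEmit (pvKey c) cs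

theorem pvStepA_some (ss : List Char) (p c : Char) :
    pvStepA (ss, some p) c =
      (ss ++ (if pvKey c == pvKey p then [c] else ['\t', c]), some c) := by
  simp only [pvStepA, pvKey, pvIsAl]
  by_cases h1 : PySem.Chars.isalpha c <;> by_cases h2 : c = '\'' <;>
    by_cases h3 : PySem.Chars.isalpha p <;> by_cases h4 : p = '\'' <;>
    simp [h1, h2, h3, h4]

theorem pvFoldA (l : List Char) : ∀ (ss : List Char) (p : Char),
    (l.foldl pvStepA (ss, some p)).1 = ss ++ pvEmit (pvKey p) l := by
  induction l with
  | nil => intro ss p; simp [pvEmit]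
  | cons c cs ih =>
    intro ss p
    simp only [List.foldl_cons, pvStepA_some, pvEmit, ih, List.append_assoc]

theorem pvConsIntersperse (x : List Char) (c : Char) (r : List Char) (rs : List (List Char)) :
    (List.intersperse x ((c :: r) :: rs)).flatten = c :: (List.intersperse x (r :: rs)).flatten := by
  cases rs <;> simp [List.intersperse]

theorem pvJoinRuns (cs : List Char) : ∀ (c : Char),
    (List.intersperse ['\t'] (pvRuns (c :: cs))).flatten = c :: pvEmit (pvKey c) cs := by
  induction cs with
  | nil => intro c; simp [pvRuns, pvRunGo, pvEmit]
  | cons d ds ih =>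
    intro c
    have hd := ih d
    simp only [pvRuns, pvRunGo] at hd ⊢
    rcases hgo : pvRunGo d ds with ⟨r, rs⟩
    rw [hgo] at hd
    dsimp only at hd ⊢
    by_cases h : (pvKey c == pvKey d) = true
    · simp only [if_pos h]
      rw [pvConsIntersperse, hd]
      have hk : (pvKey d == pvKey c) = true := by
        simp only [beq_iff_eq] at h ⊢; exact h.symm
      simp [pvEmit, hk]
    · simp only [if_neg h]
      have hstep : (List.intersperse ['\t'] ([c] :: r :: rs)).flatten
          = c :: '\t' :: (List.intersperse ['\t'] (r :: rs)).flatten := by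
        simp [List.intersperse]
      rw [hstep, hd]
      have hk : (pvKey d == pvKey c) = false := by
        simp only [beq_eq_false_iff_ne, ne_eq]
        simp only [beq_iff_eq] at h
        exact fun e => h e.symm
      simp [pvEmit, hk]

-- ===== VERDICT (by name: the statement is the Claim_ definition above) =====
theorem split_eng_chi_spec : Claim_equal_split_eng_chi := by
  intro s _
  unfold Spec_split_eng_chi split_eng_chi split_eng_chi_alt
  cases h : s.toList with
  | nil => simp [pvRuns]
  | cons c cs =>
    have hfirst : pvStepA ([], none) c = ([c], some c) := by
      simp only [pvStepA]
      by_cases h1 : PySem.Chars.isalpha c <;> by_cases h2 : c = '\'' <;>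
        simp [pvIsAl, h1, h2]
    simp only [List.foldl_cons, hfirst, pvFoldA, pvJoinRuns, List.singleton_append]
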